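-- pv_equiv track=rewrite | github.com/pisterlabs/promptset | data/scraping/repos/hdeep03~Sensai/server~notes.py | create_text_shards
-- ===== SOURCE A (Python) =====
-- def create_text_shards(text, shardsize, sliding_amt):
--   text_shards = []
--   for i in range(len(text)//sliding_amt+1):
--     def find_from_ind(string,text,ind,direction):
--       while True:
--         if ind >= len(string):
--           return ind
--         if ind <= 0:
--           return 0
--         ind_char = string[ind]
--         if ind_char == text:
--           return ind+direction
--         ind+=direction
--     start_ind = find_from_ind(text," ",i*sliding_amt,1)
--     end_ind = find_from_ind(text," ",i*sliding_amt+shardsize,-1)+1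
--     text_shards.append(text[start_ind:end_ind])
--
--   return text_shards
-- ===== SOURCE B (Python) =====
-- def create_text_shards(text, shardsize, sliding_amt):
--     n = len(text)
--     # two linear precomputation passes: na[i] = forward word-boundary result from i (0 < i < n),
--     # pb[i] = backward word-boundary result from i (0 <= i < n)
--     na = [0] * n
--     nxt = n
--     for i in range(n - 1, -1, -1):
--         if text[i] == ' ':
--             nxt = i + 1
--         na[i] = nxt
--     pb = [0] * n
--     for i in range(1, n):
--         pb[i] = i - 1 if text[i] == ' ' else pb[i - 1]
--     shards = []
--     for i in range(n // sliding_amt + 1):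
--         s = i * sliding_amt
--         start = s if s >= n else (0 if s <= 0 else na[s])
--         e = s + shardsize
--         end = (e if e >= n else (0 if e <= 0 else pb[e])) + 1
--         shards.append(text[start:end])
--     return shards
-- ===== Notes on version B (the rewrite author's own statement) =====
-- stated objective: alternative
-- what changed: B precomputes, in two linear passes, arrays of forward/backward word-boundary answers for every position, so each shard's boundaries become O(1) array lookups instead of A's per-shard boundary walks over the text.
import Mathlib
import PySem

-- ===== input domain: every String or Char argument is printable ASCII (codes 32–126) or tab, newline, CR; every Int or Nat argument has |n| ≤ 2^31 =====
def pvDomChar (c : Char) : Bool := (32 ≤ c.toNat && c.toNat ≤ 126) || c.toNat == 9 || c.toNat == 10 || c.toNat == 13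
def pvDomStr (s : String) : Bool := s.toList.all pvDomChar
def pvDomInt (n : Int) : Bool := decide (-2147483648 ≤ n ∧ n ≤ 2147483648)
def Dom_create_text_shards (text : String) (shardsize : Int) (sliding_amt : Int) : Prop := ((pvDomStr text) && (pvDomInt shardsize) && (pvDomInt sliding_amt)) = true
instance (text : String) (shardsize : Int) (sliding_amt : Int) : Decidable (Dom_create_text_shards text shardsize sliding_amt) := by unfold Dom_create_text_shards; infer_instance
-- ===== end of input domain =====

-- B replaces A's per-shard boundary walks by two precomputed boundary arrays with O(1) lookups; proved equal on Pre_ (sliding_amt ≠ 0; Python A raises ZeroDivisionError there).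


-- ===== PORT A =====
-- find_from_ind with direction = 1 (the only two directions A uses are ±1; each gets its own recursion for termination)
def findFwd (cs : List Char) (t : Char) (ind : Int) : Int :=
  if (cs.length : Int) ≤ ind then ind
  else if ind ≤ 0 then 0
  else if PySem.List.pyGetD cs ind ' ' = t then ind + 1
  else findFwd cs t (ind + 1)
termination_by ((cs.length : Int) - ind).toNat
decreasing_by simp_wf; omega

-- find_from_ind with direction = -1
def findBwd (cs : List Char) (t : Char) (ind : Int) : Int :=
  if (cs.length : Int) ≤ ind then ind
  else if ind ≤ 0 then 0
  else if PySem.List.pyGetD cs ind ' ' = t then ind - 1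
  else findBwd cs t (ind - 1)
termination_by ind.toNat
decreasing_by simp_wf; omega

def create_text_shards (text : String) (shardsize : Int) (sliding_amt : Int) : List String :=
  let cs := text.toList
  (PySem.List.pyRange 0 (PySem.Int.floordiv (cs.length : Int) sliding_amt + 1) 1).foldl
    (fun text_shards i =>
      let start_ind := findFwd cs ' ' (i * sliding_amt)
      let end_ind := findBwd cs ' ' (i * sliding_amt + shardsize) + 1
      text_shards ++ [String.ofList (PySem.List.slice cs (some start_ind) (some end_ind))]) []

-- ===== PORT B =====
-- Source B's backward pass building na (value at i computed from the carried 'nxt' of positions > i);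
-- returns (nxt entering position i, na[i..n-1])
def naRec (cs : List Char) (i : Int) (n : Int) : Int × List Int :=
  match cs with
  | [] => (n, [])
  | c :: rest =>
    let (nx, tail) := naRec rest (i + 1) n
    let nx' := if c = ' ' then i + 1 else nx
    (nx', nx' :: tail)

-- Source B's forward pass building pb (pb[0] = 0; pb[i] = i-1 if text[i]==' ' else pb[i-1])
def pbRec (cs : List Char) (i : Int) (prev : Int) : List Int :=
  match cs with
  | [] => []
  | c :: rest =>
    let cur := if i ≤ 0 then 0 else if c = ' ' then i - 1 else prev
    cur :: pbRec rest (i + 1) cur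

def create_text_shards_alt (text : String) (shardsize : Int) (sliding_amt : Int) : List String :=
  let cs := text.toList
  let n : Int := cs.length
  let na := (naRec cs 0 n).2
  let pb := pbRec cs 0 0
  (PySem.List.pyRange 0 (PySem.Int.floordiv n sliding_amt + 1) 1).foldl
    (fun shards i =>
      let s := i * sliding_amt
      let start := if n ≤ s then s else if s ≤ 0 then 0 else PySem.List.pyGetD na s 0
      let e := s + shardsize
      let endd := (if n ≤ e then e else if e ≤ 0 then 0 else PySem.List.pyGetD pb e 0) + 1
      shards ++ [String.ofList (PySem.List.slice cs (some start) (some endd))]) []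

-- ===== PRECONDITION & SPEC =====
-- Python A raises ZeroDivisionError on len(text)//sliding_amt when sliding_amt = 0; that is all Pre_ excludes.
def Pre_create_text_shards (text : String) (shardsize : Int) (sliding_amt : Int) : Prop := sliding_amt ≠ 0
instance (text : String) (shardsize : Int) (sliding_amt : Int) : Decidable (Pre_create_text_shards text shardsize sliding_amt) := by unfold Pre_create_text_shards; infer_instance

def pvWitness_create_text_shards : String × Int × Int := ("ab cd e", 4, 2)

def Spec_create_text_shards (text : String) (shardsize : Int) (sliding_amt : Int) (out : List String) : Prop := out = create_text_shards_alt text shardsize sliding_amt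
instance (text : String) (shardsize : Int) (sliding_amt : Int) (out : List String) : Decidable (Spec_create_text_shards text shardsize sliding_amt out) := by unfold Spec_create_text_shards; infer_instance

-- ===== CLAIM (what is proved, stated in full; the proofs are below) =====
def Claim_equal_create_text_shards : Prop := ∀ (text : String) (shardsize : Int) (sliding_amt : Int), Dom_create_text_shards text shardsize sliding_amt → Pre_create_text_shards text shardsize sliding_amt → Spec_create_text_shards text shardsize sliding_amt (create_text_shards text shardsize sliding_amt)

-- ===== LEMMAS AND PROOFS =====

theorem findFwd_of_len_le (cs : List Char) (t : Char) (ind : Int) (h : (cs.length : Int) ≤ ind) :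
    findFwd cs t ind = ind := by
  rw [findFwd]; simp [h]

theorem findBwd_of_len_le (cs : List Char) (t : Char) (ind : Int) (h : (cs.length : Int) ≤ ind) :
    findBwd cs t ind = ind := by
  rw [findBwd]; simp [h]

theorem findFwd_of_nonpos (cs : List Char) (t : Char) (ind : Int)
    (h1 : ¬ (cs.length : Int) ≤ ind) (h2 : ind ≤ 0) : findFwd cs t ind = 0 := by
  rw [findFwd]; simp [h1, h2]

theorem findBwd_of_nonpos (cs : List Char) (t : Char) (ind : Int)
    (h1 : ¬ (cs.length : Int) ≤ ind) (h2 : ind ≤ 0) : findBwd cs t ind = 0 := by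
  rw [findBwd]; simp [h1, h2]

theorem naRec_fst (cs full : List Char) (i : Nat) (hdrop : full.drop i = cs)
    (hle : i + cs.length = full.length) (hi : 0 < i) :
    (naRec cs (i : Int) (full.length : Int)).1 = findFwd full ' ' (i : Int) := by
  induction cs generalizing i with
  | nil =>
    simp at hle
    rw [naRec, findFwd_of_len_le full ' ' (i : Int) (by omega)]
    omega
  | cons c rest ih =>
    have hlt : i < full.length := by simp at hle; omega
    have hcons := List.drop_eq_getElem_cons hlt
    rw [hdrop] at hcons
    have hc : full[i] = c := by injection hcons with h1 _; exact h1.symm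
    have hrest : full.drop (i + 1) = rest := by injection hcons with _ h2; exact h2.symm
    have hget : PySem.List.pyGetD full (i : Int) ' ' = c := by
      rw [PySem.List.pyGetD_eq_getElem full ' ' (by omega) (by exact_mod_cast hlt)]
      simpa using hc
    have h1 : ¬ ((full.length : Int) ≤ (i : Int)) := by exact_mod_cast not_le.mpr hlt
    have h2 : ¬ ((i : Int) ≤ 0) := by omega
    rw [findFwd, if_neg h1, if_neg h2, hget]
    simp only [naRec]
    by_cases hsp : c = ' '
    · simp [hsp]
    · have := ih (i + 1) (by exact_mod_cast hrest) (by simp at hle ⊢; omega) (by omega)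
      simp only [hsp]
      push_cast at this ⊢
      rw [this]

theorem naRec_snd (cs full : List Char) (i j : Nat) (hdrop : full.drop i = cs)
    (hle : i + cs.length = full.length) (hj : j < cs.length) (hpos : 0 < i + j) :
    (naRec cs (i : Int) (full.length : Int)).2[j]? = some (findFwd full ' ' ((i : Int) + (j : Int))) := by
  induction cs generalizing i j with
  | nil => simp at hj
  | cons c rest ih =>
    have hlt : i < full.length := by simp at hle; omega
    have hcons := List.drop_eq_getElem_cons hlt
    rw [hdrop] at hcons
    have hrest : full.drop (i + 1) = rest := by injection hcons with _ h2; exact h2.symm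
    match j with
    | 0 =>
      have hfst := naRec_fst (c :: rest) full i hdrop hle (by omega)
      simp only [naRec] at hfst ⊢
      simpa using hfst
    | Nat.succ j' =>
      have := ih (i + 1) j' (by exact_mod_cast hrest) (by simp at hle ⊢; omega)
        (by simp at hj; omega) (by omega)
      simp only [naRec]
      push_cast at this ⊢
      rw [show ((i : Int) + ((j' : Int) + 1)) = ((i : Int) + 1) + (j' : Int) by ring]
      simpa using this

theorem pbRec_get (cs full : List Char) (i j : Nat) (prev : Int) (hdrop : full.drop i = cs)
    (hprev : 1 ≤ i → prev = findBwd full ' ' ((i : Int) - 1)) (hj : j < cs.length) :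
    (pbRec cs (i : Int) prev)[j]? = some (findBwd full ' ' ((i : Int) + (j : Int))) := by
  induction cs generalizing i j prev with
  | nil => simp at hj
  | cons c rest ih =>
    have hlt : i < full.length := by
      have : (full.drop i).length = (c :: rest).length := by rw [hdrop]
      simp at this; omega
    have hcons := List.drop_eq_getElem_cons hlt
    rw [hdrop] at hcons
    have hc : full[i] = c := by injection hcons with h1 _; exact h1.symm
    have hrest : full.drop (i + 1) = rest := by injection hcons with _ h2; exact h2.symm
    have hget : PySem.List.pyGetD full (i : Int) ' ' = c := by
      rw [PySem.List.pyGetD_eq_getElem full ' ' (by omega) (by exact_mod_cast hlt)]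
      simpa using hc
    -- cur = findBwd full ' ' i
    have hcur : (if (i : Int) ≤ 0 then 0 else if c = ' ' then (i : Int) - 1 else prev)
        = findBwd full ' ' (i : Int) := by
      by_cases hi0 : i = 0
      · subst hi0
        rw [show ((0:Nat):Int) = 0 from rfl,
          findBwd_of_nonpos full ' ' 0 (by exact_mod_cast not_le.mpr hlt) le_rfl]
        simp
      · rw [findBwd]
        simp only [hget]
        have h1 : ¬ ((full.length : Int) ≤ (i : Int)) := by exact_mod_cast not_le.mpr hlt
        have h2 : ¬ ((i : Int) ≤ 0) := by omega
        by_cases hsp : c = ' '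
        · simp [h1, hsp]
        · simp [h1, hsp, hprev (by omega)]
    match j with
    | 0 => simp only [pbRec]; simpa using hcur
    | Nat.succ j' =>
      have := ih (i + 1) j'
        (if (i : Int) ≤ 0 then 0 else if c = ' ' then (i : Int) - 1 else prev)
        (by exact_mod_cast hrest)
        (by intro _; rw [hcur]; push_cast; ring_nf)
        (by simp at hj; omega)
      simp only [pbRec]
      push_cast at this ⊢
      rw [show ((i : Int) + ((j' : Int) + 1)) = ((i : Int) + 1) + (j' : Int) by ring]
      simpa using this

-- B's O(1) start lookup computes A's forward walk, for every integer position s.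
theorem start_eq (cs : List Char) (s : Int) :
    (if (cs.length : Int) ≤ s then s else if s ≤ 0 then 0
     else PySem.List.pyGetD (naRec cs 0 (cs.length : Int)).2 s 0) = findFwd cs ' ' s := by
  by_cases h1 : (cs.length : Int) ≤ s
  · rw [if_pos h1, findFwd_of_len_le cs ' ' s h1]
  · rw [if_neg h1]
    by_cases h2 : s ≤ 0
    · rw [if_pos h2, findFwd_of_nonpos cs ' ' s h1 h2]
    · rw [if_neg h2]
      have hj : s.toNat < cs.length := by omega
      have hsnd := naRec_snd cs cs 0 s.toNat (by simp) (by simp) hj (by omega)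
      norm_num at hsnd
      rw [show max s 0 = s by omega] at hsnd
      rw [PySem.List.pyGetD_of_nonneg _ _ (by omega), List.getD_eq_getElem?_getD, hsnd,
        Option.getD_some]

-- B's O(1) end lookup computes A's backward walk, for every integer position e.
theorem end_eq (cs : List Char) (e : Int) :
    (if (cs.length : Int) ≤ e then e else if e ≤ 0 then 0
     else PySem.List.pyGetD (pbRec cs 0 0) e 0) = findBwd cs ' ' e := by
  by_cases h1 : (cs.length : Int) ≤ e
  · rw [if_pos h1, findBwd_of_len_le cs ' ' e h1]
  · rw [if_neg h1]
    by_cases h2 : e ≤ 0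
    · rw [if_pos h2, findBwd_of_nonpos cs ' ' e h1 h2]
    · rw [if_neg h2]
      have hj : e.toNat < cs.length := by omega
      have hsnd := pbRec_get cs cs 0 e.toNat 0 (by simp) (by omega) hj
      norm_num at hsnd
      rw [show max e 0 = e by omega] at hsnd
      rw [PySem.List.pyGetD_of_nonneg _ _ (by omega), List.getD_eq_getElem?_getD, hsnd,
        Option.getD_some]

-- ===== VERDICT (by name: the statement is the Claim_ definition above) =====
theorem create_text_shards_spec : Claim_equal_create_text_shards := by
  intro text shardsize sliding_amt _hdom _hpre
  unfold Spec_create_text_shards create_text_shards create_text_shards_alt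
  apply List.foldl_ext
  intro acc i _hi
  rw [← start_eq text.toList (i * sliding_amt), ← end_eq text.toList (i * sliding_amt + shardsize)]
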